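-- pv_equiv track=rewrite | github.com/AlafateABULIMITI/CUA_MWEs | mwei/evaluate.py | _transform_preds
-- ===== SOURCE A (Python) =====
-- def _transform_preds(preds):
--     counter = 0
--     mweis_preds = ["*"] * len(preds)
--     for idx, val in enumerate(preds):
--         if val == 1:
--             mweis_preds[idx] = str(counter + 1)
--             counter = counter + 1
--         elif val == 2:
--             mweis_preds[idx] = str(-1)
--
--     for idx, val in enumerate(mweis_preds):
--         if val == str(-1):
--             for i in range(idx, -1, -1):
--                 if mweis_preds[i].isnumeric():
--                     mweis_preds[idx] = mweis_preds[i]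
--                     break
--     return mweis_preds
-- ===== SOURCE B (Python) =====
-- def _transform_preds(preds):
--     # One forward pass: remember the label of the most recent group start (val == 1)
--     # instead of re-scanning backwards for every continuation token (val == 2).
--     out = []
--     counter = 0
--     last = None
--     for val in preds:
--         if val == 1:
--             counter += 1
--             last = str(counter)
--             out.append(last)
--         elif val == 2:
--             out.append(last if last is not None else "-1")
--         else:
--             out.append("*")
--     return out
-- ===== Notes on version B (the rewrite author's own statement) =====
-- stated objective: alternative
-- what changed: Replaced the two-pass build (mark groups, then for every continuation token re-scan backwards for the nearest numeric label) by a single forward pass that carries the last group label in a variable.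
import Mathlib
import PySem

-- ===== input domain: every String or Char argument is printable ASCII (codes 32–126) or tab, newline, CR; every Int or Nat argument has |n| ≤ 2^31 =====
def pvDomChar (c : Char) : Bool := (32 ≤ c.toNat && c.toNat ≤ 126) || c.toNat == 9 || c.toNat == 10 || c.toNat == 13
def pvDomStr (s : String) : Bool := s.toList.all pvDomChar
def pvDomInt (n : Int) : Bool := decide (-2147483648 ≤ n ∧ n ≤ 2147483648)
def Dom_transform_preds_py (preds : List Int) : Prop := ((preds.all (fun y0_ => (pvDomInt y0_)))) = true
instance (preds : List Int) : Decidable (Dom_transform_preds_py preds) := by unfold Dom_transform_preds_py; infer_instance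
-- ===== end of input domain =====

-- B replaces A's per-token backward rescan by one forward pass carrying the last group label;
-- the return values are proved equal on every input.

-- ===== PORT A =====
-- first loop body: 'if val == 1: mweis[idx] = str(counter+1); counter += 1  elif val == 2: mweis[idx] = str(-1)'
def pvFpStep (st : List String × Int) (iv : Int × Int) : List String × Int :=
  if iv.2 = 1 then (PySem.List.pySetD st.1 iv.1 (PySem.Int.toStr (st.2 + 1)), st.2 + 1)
  else if iv.2 = 2 then (PySem.List.pySetD st.1 iv.1 (PySem.Int.toStr (-1)), st.2)
  else st

-- inner 'for i in range(idx, -1, -1): if mweis[i].isnumeric(): … break' — first hit wins;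
-- isnumeric ported as strIsdigit (exact here: the list holds only "*", "-1" and decimal digit strings)
def pvBreakFind (m : List String) : List Int → Option String
  | [] => none
  | i :: rest =>
    if PySem.Str.strIsdigit (PySem.List.pyGetD m i "") then some (PySem.List.pyGetD m i "")
    else pvBreakFind m rest

-- second loop body; Python enumerates the list it mutates, but iteration idx writes only at
-- index idx and reads it before writing, so reading the current value at idx is exact
def pvSpStep (m : List String) (idx : Int) : List String :=
  if PySem.List.pyGetD m idx "" = PySem.Int.toStr (-1) then
    match pvBreakFind m (PySem.List.pyRange idx (-1) (-1)) with
    | some s => PySem.List.pySetD m idx s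
    | none => m
  else m

def transform_preds_py (preds : List Int) : List String :=
  let m1 := ((PySem.List.enumerate preds 0).foldl pvFpStep (List.replicate preds.length "*", 0)).1
  (PySem.List.pyRange 0 (m1.length : Int) 1).foldl pvSpStep m1

-- ===== PORT B =====
def pvAltGo : List Int → Int → Option String → List String
  | [], _, _ => []
  | v :: rest, c, last =>
    if v = 1 then PySem.Int.toStr (c + 1) :: pvAltGo rest (c + 1) (some (PySem.Int.toStr (c + 1)))
    else if v = 2 then (last.getD "-1") :: pvAltGo rest c last
    else "*" :: pvAltGo rest c last

def transform_preds_py_alt (preds : List Int) : List String := pvAltGo preds 0 none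

-- ===== PRECONDITION & SPEC =====
def Spec_transform_preds_py (preds : List Int) (out : List String) : Prop := out = transform_preds_py_alt preds
instance (preds : List Int) (out : List String) : Decidable (Spec_transform_preds_py preds out) := by unfold Spec_transform_preds_py; infer_instance

-- ===== CLAIM (what is proved, stated in full; the proofs are below) =====
def Claim_equal_transform_preds_py : Prop := ∀ (preds : List Int), Dom_transform_preds_py preds → Spec_transform_preds_py preds (transform_preds_py preds)

-- ===== LEMMAS AND PROOFS =====

lemma pvDigitChar (n : Nat) (h : n < 10) : PySem.Chars.isdigit n.digitChar := by
  interval_cases n <;> decide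

lemma pvToDigitsCore_all : ∀ (f n : Nat) (l : List Char),
    (∀ c ∈ l, PySem.Chars.isdigit c) → ∀ c ∈ Nat.toDigitsCore 10 f n l, PySem.Chars.isdigit c := by
  intro f
  induction f with
  | zero => intro n l hl; simpa [Nat.toDigitsCore] using hl
  | succ f ih =>
    intro n l hl c hc
    rw [Nat.toDigitsCore] at hc
    by_cases h0 : n / 10 = 0 <;> simp only [h0, reduceIte, List.mem_cons] at hc
    · rcases hc with h | h
      · exact h ▸ pvDigitChar _ (Nat.mod_lt _ (by norm_num))
      · exact hl _ h
    · refine ih _ _ ?_ c hc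
      intro d hd
      rcases List.mem_cons.mp hd with h | h
      · exact h ▸ pvDigitChar _ (Nat.mod_lt _ (by norm_num))
      · exact hl _ h

lemma pvToDigitsCore_ne_nil : ∀ (f n : Nat) (l : List Char), l ≠ [] → Nat.toDigitsCore 10 f n l ≠ [] := by
  intro f
  induction f with
  | zero => intro n l hl; simpa [Nat.toDigitsCore]
  | succ f ih =>
    intro n l hl
    rw [Nat.toDigitsCore]
    by_cases h0 : n / 10 = 0 <;> simp only [h0, reduceIte]
    · simp
    · exact ih _ _ (by simp)

lemma pvStrIsdigit_toDigits (n : Nat) : PySem.Chars.strIsdigit (Nat.toDigits 10 n) = true := by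
  rw [Nat.toDigits, Nat.toDigitsCore]
  by_cases h0 : n / 10 = 0 <;> simp only [h0, reduceIte]
  · simp [PySem.Chars.strIsdigit, pvDigitChar _ (Nat.mod_lt _ (by norm_num : (0:Nat) < 10))]
  · have h1 := pvToDigitsCore_ne_nil n (n / 10) [(n % 10).digitChar] (by simp)
    have h2 := pvToDigitsCore_all n (n / 10) [(n % 10).digitChar]
      (by intro d hd; simp at hd; exact hd ▸ pvDigitChar _ (Nat.mod_lt _ (by norm_num)))
    simp only [PySem.Chars.strIsdigit, Bool.and_eq_true, List.all_eq_true]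
    exact ⟨by simpa [List.isEmpty_iff] using h1, h2⟩

lemma pvStrIsdigit_toStr (n : Int) (h : 0 ≤ n) : PySem.Str.strIsdigit (PySem.Int.toStr n) = true := by
  rw [PySem.Str.strIsdigit_eq, PySem.Int.toList_toStr]
  unfold PySem.Int.toChars
  rw [if_neg (by omega)]
  exact pvStrIsdigit_toDigits n.toNat

lemma pvToStrNegOne : PySem.Int.toStr (-1) = "-1" := by decide

-- B's first-pass value at each position, carried as a structural map with the running counter
def pvFpMap : List Int → Int → List String
  | [], _ => []
  | v :: r, c =>
    (if v = 1 then PySem.Int.toStr (c + 1) else if v = 2 then "-1" else "*") ::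
      pvFpMap r (if v = 1 then c + 1 else c)

def pvFpC : List Int → Int → Int
  | [], c => c
  | v :: r, c => pvFpC r (if v = 1 then c + 1 else c)

lemma pvFpMap_length (r : List Int) (c : Int) : (pvFpMap r c).length = r.length := by
  induction r generalizing c with
  | nil => rfl
  | cons v r ih => simp [pvFpMap, ih]

lemma pvFp_spec : ∀ (r : List Int) (pre : List String) (c : Int),
    (PySem.List.enumerate r (pre.length : Int)).foldl pvFpStep (pre ++ List.replicate r.length "*", c)
      = (pre ++ pvFpMap r c, pvFpC r c) := by
  intro r
  induction r with
  | nil => intro pre c; simp [pvFpMap, pvFpC, PySem.List.enumerate_nil]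
  | cons v r ih =>
    intro pre c
    rw [PySem.List.enumerate_cons, List.foldl_cons, List.length_cons, List.replicate_succ]
    have hset : ∀ (x : String) (t : List String),
        PySem.List.pySetD (pre ++ "*" :: t) ((pre.length : Int)) x = pre ++ x :: t := by
      intro x t
      rw [PySem.List.pySetD_natCast]
      simp
    have hcast : ∀ x : String, (pre.length : Int) + 1 = (((pre ++ [x]).length : Nat) : Int) := by
      simp
    rcases eq_or_ne v 1 with h1 | h1
    · subst h1
      simp only [pvFpStep, reduceIte]
      rw [hset, List.append_cons pre _ (List.replicate r.length "*"),
        hcast (PySem.Int.toStr (c + 1)), ih]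
      simp [pvFpMap, pvFpC]
    · rcases eq_or_ne v 2 with h2 | h2
      · subst h2
        simp only [pvFpStep]
        rw [if_neg h1]
        simp only [if_true]
        rw [hset, List.append_cons pre _ (List.replicate r.length "*"),
          hcast (PySem.Int.toStr (-1)), ih]
        simp [pvFpMap, pvFpC, pvToStrNegOne]
      · simp only [pvFpStep]
        rw [if_neg h1, if_neg h2]
        rw [show pre ++ "*" :: List.replicate r.length "*"
            = (pre ++ ["*"]) ++ List.replicate r.length "*" by rw [List.append_cons],
          hcast "*", ih]
        simp [pvFpMap, pvFpC, h1, h2]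

-- running 'last numeric seen so far' of A's array, read off by a left fold
def pvUpd (a : Option String) (x : String) : Option String :=
  if PySem.Str.strIsdigit x then some x else a

lemma pvUpd_digit (a : Option String) (x : String) (h : PySem.Str.strIsdigit x = true) :
    pvUpd a x = some x := by unfold pvUpd; rw [h]; simp

lemma pvUpd_nondigit (a : Option String) (x : String) (h : PySem.Str.strIsdigit x = false) :
    pvUpd a x = a := by unfold pvUpd; rw [h]; simp

lemma pvBreakFind_spec (m : List String) : ∀ (i : Nat), i < m.length →
    pvBreakFind m (PySem.List.pyRange (i : Int) (-1) (-1)) = (m.take (i + 1)).foldl pvUpd none := by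
  intro i
  induction i with
  | zero =>
    intro hi
    rw [PySem.List.pyRange_neg_one_cons (by omega)]
    simp only [pvBreakFind]
    rw [show (((0:Nat) : Int) - 1) = (-1 : Int) by norm_num, PySem.List.pyRange_neg_one_eq_nil (by omega)]
    rw [PySem.List.pyGetD_natCast]
    rcases m with _ | ⟨x, t⟩
    · simp at hi
    · simp [pvBreakFind, pvUpd, List.getD]
  | succ k ih =>
    intro hi
    rw [PySem.List.pyRange_neg_one_cons (by omega)]
    simp only [pvBreakFind]
    rw [PySem.List.pyGetD_natCast]
    have ht : m.take (k + 1 + 1) = m.take (k + 1) ++ [m[k+1]] := by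
      rw [List.take_add_one]
      simp [List.getElem?_eq_getElem hi]
    rw [ht, List.foldl_append]
    rw [show (((k+1 : Nat) : Int)) - 1 = ((k : Nat) : Int) by push_cast; ring]
    rw [ih (by omega)]
    simp only [List.foldl_cons, List.foldl_nil, pvUpd]
    rw [List.getD_eq_getElem _ _ hi]

lemma pvSp_spec : ∀ (s : List Int) (out : List String) (c : Int) (last : Option String),
    out.foldl pvUpd none = last →
    (∀ x, last = some x → PySem.Str.strIsdigit x = true) →
    0 ≤ c →
    (PySem.List.pyRange (out.length : Int) ((out.length : Int) + (s.length : Int)) 1).foldl pvSpStep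
        (out ++ pvFpMap s c)
      = out ++ pvAltGo s c last := by
  intro s
  induction s with
  | nil =>
    intro out c last _ _ _
    simp only [List.length_nil, Nat.cast_zero, add_zero]
    rw [PySem.List.pyRange_one_eq_nil le_rfl]
    simp [pvFpMap, pvAltGo]
  | cons v s' ih =>
    intro out c last hinv hlast hc
    rw [PySem.List.pyRange_one_cons (by push_cast [List.length_cons]; omega)]
    rw [List.foldl_cons]
    simp only [pvFpMap, pvSpStep]
    have hget : PySem.List.pyGetD
        (out ++ (if v = 1 then PySem.Int.toStr (c + 1) else if v = 2 then "-1" else "*") :: pvFpMap s' (if v = 1 then c + 1 else c))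
        ((out.length : Nat) : Int) "" =
        (if v = 1 then PySem.Int.toStr (c + 1) else if v = 2 then "-1" else "*") := by
      rw [PySem.List.pyGetD_natCast]
      simp [List.getD]
    rw [hget]
    have hbound : ∀ (x : String), (out.length : Int) + (((v :: s').length : Nat) : Int)
        = (((out ++ [x]).length : Nat) : Int) + ((s'.length : Nat) : Int) := by
      intro x; simp; ring
    have hstart : ∀ (x : String), (out.length : Int) + 1 = (((out ++ [x]).length : Nat) : Int) := by
      intro x; simp
    rcases eq_or_ne v 1 with h1 | h1
    · subst h1
      simp only [reduceIte]
      rw [if_neg (by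
        intro hcontr
        have hd := pvStrIsdigit_toStr (c + 1) (by omega)
        rw [hcontr, pvToStrNegOne] at hd
        exact absurd hd (by decide))]
      rw [List.append_cons, hstart (PySem.Int.toStr (c + 1)), hbound (PySem.Int.toStr (c + 1)),
        ih (out ++ [PySem.Int.toStr (c + 1)]) (c + 1) (some (PySem.Int.toStr (c + 1)))
          (by rw [List.foldl_append, hinv]
              simp only [List.foldl_cons, List.foldl_nil]
              exact pvUpd_digit _ _ (pvStrIsdigit_toStr (c + 1) (by omega)))
          (by intro x hx; cases hx; exact pvStrIsdigit_toStr (c + 1) (by omega))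
          (by omega)]
      simp [pvAltGo]
    · rcases eq_or_ne v 2 with h2 | h2
      · subst h2
        simp only [if_neg h1, reduceIte]
        rw [if_pos pvToStrNegOne.symm]
        have hlen : out.length < (out ++ "-1" :: pvFpMap s' c).length := by simp
        rw [pvBreakFind_spec _ out.length hlen]
        have htake : (out ++ "-1" :: pvFpMap s' c).take (out.length + 1) = out ++ ["-1"] := by
          simpa using List.take_length_add_append (l₁ := out) (l₂ := "-1" :: pvFpMap s' c) 1
        rw [htake, List.foldl_append, hinv]
        simp only [List.foldl_cons, List.foldl_nil]
        rw [pvUpd_nondigit last "-1" (by decide)]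
        rcases last with _ | str
        · rw [List.append_cons out "-1" (pvFpMap s' c), hstart "-1", hbound "-1",
            ih (out ++ ["-1"]) c none
              (by rw [List.foldl_append, hinv]
                  simp only [List.foldl_cons, List.foldl_nil]
                  exact pvUpd_nondigit _ _ (by decide))
              (by intro x hx; cases hx)
              hc]
          simp [pvAltGo, h1]
        · have hdig : PySem.Str.strIsdigit str = true := hlast str rfl
          dsimp only
          have hset : PySem.List.pySetD (out ++ "-1" :: pvFpMap s' c) ((out.length : Nat) : Int) str
              = out ++ str :: pvFpMap s' c := by
            rw [PySem.List.pySetD_natCast]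
            simp
          rw [hset, List.append_cons out str (pvFpMap s' c), hstart str, hbound str,
            ih (out ++ [str]) c (some str)
              (by rw [List.foldl_append, hinv]
                  simp only [List.foldl_cons, List.foldl_nil]
                  exact pvUpd_digit _ _ hdig)
              (by intro x hx; cases hx; exact hdig)
              hc]
          simp [pvAltGo, h1]
      · simp only [if_neg h1, if_neg h2]
        rw [if_neg (by rw [pvToStrNegOne]; decide)]
        rw [List.append_cons out "*" (pvFpMap s' c), hstart "*", hbound "*",
          ih (out ++ ["*"]) c last
            (by rw [List.foldl_append, hinv]
                simp only [List.foldl_cons, List.foldl_nil]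
                exact pvUpd_nondigit _ _ (by decide))
            hlast
            hc]
        simp [pvAltGo, h1, h2]

-- ===== VERDICT (by name: the statement is the Claim_ definition above) =====
theorem transform_preds_py_spec : Claim_equal_transform_preds_py := by
  intro preds _
  unfold Spec_transform_preds_py transform_preds_py transform_preds_py_alt
  have hfp := pvFp_spec preds [] 0
  simp only [List.length_nil, Nat.cast_zero, List.nil_append] at hfp
  rw [hfp]
  have hsp := pvSp_spec preds [] 0 none rfl (by intro x hx; cases hx) le_rfl
  simp only [List.length_nil, Nat.cast_zero, List.nil_append, zero_add] at hsp
  simpa only [pvFpMap_length] using hsp
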